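-- pv_equiv track=rewrite | github.com/SunWuChoi/Python_practice_BaekJoon | Personal Project/fifa.py | best_calculator
-- ===== SOURCE A (Python) =====
-- def best_calculator(l, k):
--     for i in range(k):
--         max_val = 0
--         max_index = -1
--
--         for i in range(len(l)):
--             if l[i] > max_val:
--                 max_val = l[i]
--                 max_index = i
--         if max_val > 0: l[max_index] -= 1
--
--     return max(l)
-- ===== SOURCE B (Python) =====
-- def best_calculator(l, k):
--     # Binary search for the final maximum instead of simulating k decrements.
--     # Note: unlike A, this does not mutate l; return values agree.
--     m = max(l)
--     if m <= 0 or k <= 0: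
--         return m
--
--     def cost(v):
--         # number of unit decrements needed to bring every element down to <= v
--         return sum(x - v for x in l if x > v)
--
--     if cost(0) <= k:
--         return 0
--     lo, hi = 0, m  # invariant: cost(lo) > k >= cost(hi)
--     while hi - lo > 1:
--         mid = (lo + hi) // 2
--         if cost(mid) <= k:
--             hi = mid
--         else:
--             lo = mid
--     return hi
-- ===== Notes on version B (the rewrite author's own statement) =====
-- stated objective: faster
-- what changed: Instead of simulating k rounds of find-and-decrement-the-maximum, B binary-searches the final maximum level v using the decrement-cost function cost(v)=sum(max(0,x-v)); B also does not mutate l.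
-- outside the precondition, e.g. on best_calculator([], 3): A raises ValueError, B raises ValueError
import Mathlib
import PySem

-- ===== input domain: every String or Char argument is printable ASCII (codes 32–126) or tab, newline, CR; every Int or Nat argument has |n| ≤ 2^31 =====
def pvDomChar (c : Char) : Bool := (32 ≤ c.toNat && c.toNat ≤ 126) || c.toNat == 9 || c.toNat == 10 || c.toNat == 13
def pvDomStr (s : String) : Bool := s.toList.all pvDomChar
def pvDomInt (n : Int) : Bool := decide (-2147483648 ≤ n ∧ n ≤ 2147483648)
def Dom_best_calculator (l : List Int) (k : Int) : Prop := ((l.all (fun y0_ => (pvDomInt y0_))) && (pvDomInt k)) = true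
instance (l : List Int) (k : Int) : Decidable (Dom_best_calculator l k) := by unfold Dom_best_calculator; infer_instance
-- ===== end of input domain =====

-- B replaces the O(k*n) simulation of k find-max-and-decrement rounds by a binary search on the
-- final maximum level (return values agree; A additionally mutates l in place, B does not).

-- ===== PORT A =====
-- inner loop: for i in range(len(l)): if l[i] > max_val: max_val, max_index = l[i], i
def pvInner (l : List Int) : Int × Int :=
  (PySem.List.enumerate l 0).foldl
    (fun s p => if p.2 > s.1 then (p.2, p.1) else s) (0, -1)

-- one iteration of the outer loop body (the guard ensures max_index is a valid nonneg index)
def pvAStep (l : List Int) : List Int :=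
  let s := pvInner l
  if s.1 > 0 then l.set s.2.toNat ((l.getD s.2.toNat 0) - 1) else l

def pvAIter : Nat → List Int → List Int
  | 0, l => l
  | n+1, l => pvAIter n (pvAStep l)

def best_calculator (l : List Int) (k : Int) : Int :=
  (PySem.List.max? (pvAIter k.toNat l) (fun x => x)).getD 0

-- ===== PORT B =====
-- cost(v) = sum(x - v for x in l if x > v)
def pvCost (l : List Int) (v : Int) : Int :=
  l.foldl (fun s x => if x > v then s + (x - v) else s) 0

-- the while loop of Source B; the Nat argument is a totality fuel, never exhausted (gap shrinks each turn)
def pvBS (l : List Int) (k : Int) : Nat → Int → Int → Int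
  | 0, _, hi => hi
  | f+1, lo, hi =>
    if hi - lo > 1 then
      let mid := PySem.Int.floordiv (lo + hi) 2
      if pvCost l mid ≤ k then pvBS l k f lo mid else pvBS l k f mid hi
    else hi

def best_calculator_alt (l : List Int) (k : Int) : Int :=
  let m := (PySem.List.max? l (fun x => x)).getD 0
  if m ≤ 0 ∨ k ≤ 0 then m
  else if pvCost l 0 ≤ k then 0
  else pvBS l k m.toNat 0 m

-- ===== PRECONDITION & SPEC =====
-- Pre_ excludes only the empty list, on which both A and B raise ValueError (max of empty sequence).
def Pre_best_calculator (l : List Int) (k : Int) : Prop := l ≠ []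
instance (l : List Int) (k : Int) : Decidable (Pre_best_calculator l k) := by unfold Pre_best_calculator; infer_instance
def pvWitness_best_calculator : List Int × Int := ([3, 1, 2], 4)

def Spec_best_calculator (l : List Int) (k : Int) (out : Int) : Prop := out = best_calculator_alt l k
instance (l : List Int) (k : Int) (out : Int) : Decidable (Spec_best_calculator l k out) := by unfold Spec_best_calculator; infer_instance

-- ===== CLAIM (what is proved, stated in full; the proofs are below) =====
def Claim_equal_best_calculator : Prop := ∀ (l : List Int) (k : Int), Dom_best_calculator l k → Pre_best_calculator l k → Spec_best_calculator l k (best_calculator l k)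


-- ===== LEMMAS AND PROOFS =====

theorem pvCost_eq (l : List Int) (v : Int) :
    pvCost l v = (l.map (fun x => max 0 (x - v))).sum := by
  suffices h : ∀ s : Int, l.foldl (fun s x => if x > v then s + (x - v) else s) s
      = s + (l.map (fun x => max 0 (x - v))).sum by
    simpa using h 0
  induction l with
  | nil => intro s; simp
  | cons x t ih =>
    intro s
    have hx : (if x > v then s + (x - v) else s) = s + max 0 (x - v) := by
      split_ifs with h <;> omega
    simp only [List.foldl_cons, List.map_cons, List.sum_cons, hx, ih]
    omega

theorem pvCost_nonneg (l : List Int) (v : Int) : 0 ≤ pvCost l v := by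
  rw [pvCost_eq]
  induction l with
  | nil => simp
  | cons x t ih => simp only [List.map_cons, List.sum_cons]; omega

theorem pvCost_zero_of_le (l : List Int) (v : Int) (h : ∀ x ∈ l, x ≤ v) :
    pvCost l v = 0 := by
  rw [pvCost_eq]
  induction l with
  | nil => simp
  | cons x t ih =>
    have hx := h x (by simp)
    have ht := ih (fun y hy => h y (by simp [hy]))
    simp only [List.map_cons, List.sum_cons, ht]
    omega

theorem pvCost_le_of_mem (l : List Int) (v x : Int) (hx : x ∈ l) :
    max 0 (x - v) ≤ pvCost l v := by
  rw [pvCost_eq]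
  induction l with
  | nil => simp at hx
  | cons y t ih =>
    have hnn : 0 ≤ (t.map (fun x => max 0 (x - v))).sum := by
      have := pvCost_nonneg t v; rwa [pvCost_eq] at this
    rcases List.mem_cons.mp hx with h | h
    · subst h; simp only [List.map_cons, List.sum_cons]; omega
    · have := ih h; simp only [List.map_cons, List.sum_cons]; omega

theorem pvCost_set (l : List Int) (i : Nat) (y v : Int) (hi : i < l.length) :
    pvCost (l.set i y) v = pvCost l v - max 0 (l.getD i 0 - v) + max 0 (y - v) := by
  rw [pvCost_eq, pvCost_eq]
  induction l generalizing i with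
  | nil => simp at hi
  | cons x t ih =>
    cases i with
    | zero => simp only [List.set, List.map_cons, List.sum_cons, List.getD_cons_zero]; omega
    | succ j =>
      have hj : j < t.length := by simpa using hi
      have := ih j hj
      simp only [List.set, List.map_cons, List.sum_cons, List.getD_cons_succ]
      omega

-- exists a gt element when cost positive
theorem pvCost_exists_gt (l : List Int) (v : Int) (h : 0 < pvCost l v) :
    ∃ x ∈ l, v < x := by
  by_contra hc
  push_neg at hc
  have := pvCost_zero_of_le l v (fun x hx => le_of_not_gt fun hgt => absurd hgt (by
    have := hc x hx; omega))
  omega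

-- the running maximum A's inner loop computes (initialised at 0)
def pvM (l : List Int) : Int := l.foldl max 0

theorem pvM_nonneg (l : List Int) : 0 ≤ pvM l := (PySem.List.le_foldl_max l 0).1

theorem le_pvM (l : List Int) (x : Int) (hx : x ∈ l) : x ≤ pvM l :=
  (PySem.List.le_foldl_max l 0).2 x hx

theorem foldl_max_le (l : List Int) (c : Int) (h : ∀ x ∈ l, x ≤ c) :
    ∀ a, a ≤ c → l.foldl max a ≤ c := by
  induction l with
  | nil => intro a ha; simpa using ha
  | cons x t ih =>
    intro a ha
    have hx := h x (by simp)
    exact ih (fun y hy => h y (by simp [hy])) (max a x) (by omega)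

-- fold of A's inner loop over the enumerated list, for the invariant proof
def pvEnumFold (l : List Int) (s0 a j : Int) : Int × Int :=
  (PySem.List.enumerate l s0).foldl (fun s p => if p.2 > s.1 then (p.2, p.1) else s) (a, j)

theorem pvEnumFold_spec (l : List Int) : ∀ (s0 a j : Int),
    (pvEnumFold l s0 a j).1 = l.foldl max a ∧
    (pvEnumFold l s0 a j = (a, j) ∨
      ∃ i : Nat, i < l.length ∧ (pvEnumFold l s0 a j).2 = s0 + (i : Int) ∧
        l.getD i 0 = (pvEnumFold l s0 a j).1) := by
  induction l with
  | nil =>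
    intro s0 a j
    simp [pvEnumFold, PySem.List.enumerate_nil]
  | cons x t ih =>
    intro s0 a j
    have hstep : pvEnumFold (x :: t) s0 a j
        = pvEnumFold t (s0 + 1) (if x > a then x else a) (if x > a then s0 else j) := by
      simp only [pvEnumFold, PySem.List.enumerate_cons, List.foldl_cons]
      split_ifs with h <;> rfl
    by_cases h : x > a
    · have hmax : max a x = x := by omega
      obtain ⟨ih1, ih2⟩ := ih (s0 + 1) x s0
      rw [hstep, if_pos h, if_pos h]
      constructor
      · rw [List.foldl_cons, hmax, ih1]
      · rcases ih2 with heq | ⟨i, hi, h2, h3⟩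
        · right
          refine ⟨0, by simp, ?_, ?_⟩
          · rw [heq]; simp
          · rw [heq]; simp
        · right
          refine ⟨i + 1, by simpa using hi, ?_, ?_⟩
          · rw [h2]; push_cast; ring
          · simpa using h3
    · have hmax : max a x = a := by omega
      obtain ⟨ih1, ih2⟩ := ih (s0 + 1) a j
      rw [hstep, if_neg h, if_neg h]
      constructor
      · rw [List.foldl_cons, hmax, ih1]
      · rcases ih2 with heq | ⟨i, hi, h2, h3⟩
        · exact Or.inl heq
        · right
          refine ⟨i + 1, by simpa using hi, ?_, ?_⟩
          · rw [h2]; push_cast; ring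
          · simpa using h3

theorem pvInner_fst (l : List Int) : (pvInner l).1 = pvM l :=
  (pvEnumFold_spec l 0 0 (-1)).1

theorem pvInner_snd (l : List Int) (h : 0 < pvM l) :
    ∃ i : Nat, i < l.length ∧ (pvInner l).2 = (i : Int) ∧ l.getD i 0 = pvM l := by
  have hfst := (pvEnumFold_spec l 0 0 (-1)).1
  rcases (pvEnumFold_spec l 0 0 (-1)).2 with heq | ⟨i, hi, h2, h3⟩
  · exfalso
    rw [heq] at hfst
    simp only at hfst
    unfold pvM at h
    omega
  · refine ⟨i, hi, ?_, ?_⟩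
    · show (pvEnumFold l 0 0 (-1)).2 = (i : Int)
      rw [h2]; ring
    · show l.getD i 0 = pvM l
      rw [h3, hfst]; rfl

theorem pvAStep_of_nonpos (l : List Int) (h : pvM l ≤ 0) : pvAStep l = l := by
  unfold pvAStep
  rw [if_neg]
  rw [pvInner_fst]; omega

theorem pvAStep_eq_set (l : List Int) (h : 0 < pvM l) :
    ∃ i : Nat, i < l.length ∧ l.getD i 0 = pvM l ∧ pvAStep l = l.set i (pvM l - 1) := by
  obtain ⟨i, hi, h2, h3⟩ := pvInner_snd l h
  refine ⟨i, hi, h3, ?_⟩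
  unfold pvAStep
  rw [if_pos (by rw [pvInner_fst]; exact h)]
  rw [h2]
  rw [List.getD_eq_getElem?_getD] at h3
  simp [h3]

theorem pvAStep_length (l : List Int) : (pvAStep l).length = l.length := by
  by_cases h : 0 < pvM l
  · obtain ⟨i, hi, _, h3⟩ := pvAStep_eq_set l h
    rw [h3, List.length_set]
  · rw [pvAStep_of_nonpos l (by omega)]

theorem pvCost_step (l : List Int) (h : 0 < pvM l) (v : Int) :
    pvCost (pvAStep l) v = max 0 (pvCost l v - 1) := by
  obtain ⟨i, hi, hget, hset⟩ := pvAStep_eq_set l h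
  rw [hset, pvCost_set l i (pvM l - 1) v hi, hget]
  have hmem : pvM l ∈ l := by
    rw [← hget]; rw [List.getD_eq_getElem l 0 hi]; exact List.getElem_mem hi
  by_cases hv : v < pvM l
  · have h1 := pvCost_le_of_mem l v (pvM l) hmem
    omega
  · have h0 : pvCost l v = 0 :=
      pvCost_zero_of_le l v (fun x hx => le_trans (le_pvM l x hx) (by omega))
    omega

theorem pvAIter_length (n : Nat) (l : List Int) : (pvAIter n l).length = l.length := by
  induction n generalizing l with
  | zero => rfl
  | succ n ih => rw [pvAIter, ih, pvAStep_length]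

theorem pvCost_iter (n : Nat) (l : List Int) (v : Int) (hv : 0 ≤ v) :
    pvCost (pvAIter n l) v = max 0 (pvCost l v - (n : Int)) := by
  induction n generalizing l with
  | zero => simp [pvAIter]; have := pvCost_nonneg l v; omega
  | succ n ih =>
    rw [pvAIter, ih]
    by_cases h : 0 < pvM l
    · rw [pvCost_step l h v]
      have := pvCost_nonneg l v
      push_cast
      omega
    · rw [pvAStep_of_nonpos l (by omega)]
      have h0 : pvCost l v = 0 :=
        pvCost_zero_of_le l v (fun x hx => le_trans (le_pvM l x hx) (by omega))
      push_cast
      omega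

theorem pvAIter_exists_nonneg (n : Nat) (l : List Int) (h : ∃ x ∈ l, 0 ≤ x) :
    ∃ x ∈ pvAIter n l, 0 ≤ x := by
  induction n generalizing l with
  | zero => exact h
  | succ n ih =>
    rw [pvAIter]
    apply ih
    by_cases hM : 0 < pvM l
    · obtain ⟨i, hi, _, hset⟩ := pvAStep_eq_set l hM
      refine ⟨pvM l - 1, ?_, by omega⟩
      rw [hset]
      have hi' : i < (l.set i (pvM l - 1)).length := by simpa using hi
      have hval : (l.set i (pvM l - 1))[i]'hi' = pvM l - 1 := List.getElem_set_self hi'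
      have hmem := List.getElem_mem hi'
      rwa [hval] at hmem
    · rw [pvAStep_of_nonpos l (by omega)]; exact h

theorem pvMax_spec (l : List Int) (h : l ≠ []) :
    ∃ m, PySem.List.max? l (fun x => x) = some m ∧ m ∈ l ∧ ∀ y ∈ l, y ≤ m := by
  cases hm : PySem.List.max? l (fun x => x) with
  | none => exact absurd ((PySem.List.max?_eq_none_iff l _).mp hm) h
  | some m => exact ⟨m, rfl, PySem.List.max?_mem hm, PySem.List.max?_isMax hm⟩

theorem pvM_eq_max (l : List Int) (m : Int) (hmem : m ∈ l) (hmax : ∀ y ∈ l, y ≤ m) :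
    pvM l = max 0 m := by
  have h1 : m ≤ pvM l := le_pvM l m hmem
  have h2 : pvM l ≤ max 0 m := foldl_max_le l (max 0 m) (fun x hx => by
    have := hmax x hx; omega) 0 (by omega)
  have h3 := pvM_nonneg l
  omega

theorem pvBS_spec (l : List Int) (k : Int) : ∀ (f : Nat) (lo hi : Int), lo < hi →
    hi - lo ≤ (f : Int) + 1 → k < pvCost l lo → pvCost l hi ≤ k →
    lo < pvBS l k f lo hi ∧ pvBS l k f lo hi ≤ hi ∧
      pvCost l (pvBS l k f lo hi) ≤ k ∧ k < pvCost l (pvBS l k f lo hi - 1) := by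
  intro f
  induction f with
  | zero =>
    intro lo hi hlt hgap hlo hhi
    have heq : hi = lo + 1 := by omega
    refine ⟨by rw [pvBS]; omega, by rw [pvBS], by rw [pvBS]; exact hhi, ?_⟩
    rw [pvBS, heq]
    simpa using hlo
  | succ f ih =>
    intro lo hi hlt hgap hlo hhi
    rw [pvBS]
    by_cases hbig : hi - lo > 1
    · rw [if_pos hbig]
      have hmid1 : lo + 1 ≤ PySem.Int.floordiv (lo + hi) 2 :=
        (PySem.Int.le_floordiv_iff_mul_le (by omega)).mpr (by omega)
      have hmid2 : PySem.Int.floordiv (lo + hi) 2 < hi :=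
        (PySem.Int.floordiv_lt_iff_lt_mul (by omega)).mpr (by omega)
      by_cases hc : pvCost l (PySem.Int.floordiv (lo + hi) 2) ≤ k
      · rw [if_pos hc]
        have := ih lo (PySem.Int.floordiv (lo + hi) 2) (by omega) (by omega) hlo hc
        exact ⟨this.1, by omega, this.2.2.1, this.2.2.2⟩
      · rw [if_neg hc]
        have := ih (PySem.Int.floordiv (lo + hi) 2) hi (by omega) (by omega) (by omega) hhi
        exact ⟨by omega, this.2.1, this.2.2.1, this.2.2.2⟩
    · rw [if_neg hbig]
      have heq : hi = lo + 1 := by omega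
      refine ⟨by omega, le_refl _, hhi, ?_⟩
      rw [heq]
      simpa using hlo

-- ===== VERDICT (by name: the statement is the Claim_ definition above) =====
theorem best_calculator_spec : Claim_equal_best_calculator := by
  unfold Claim_equal_best_calculator
  intro l k _dom hpre
  unfold Spec_best_calculator best_calculator best_calculator_alt
  obtain ⟨m, hm, hmem, hmax⟩ := pvMax_spec l hpre
  rw [hm]
  simp only [Option.getD_some]
  have hM : pvM l = max 0 m := pvM_eq_max l m hmem hmax
  by_cases h1 : m ≤ 0 ∨ k ≤ 0
  · rw [if_pos h1]
    rcases h1 with hm0 | hk0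
    · have hiter : ∀ n, pvAIter n l = l := by
        intro n
        induction n with
        | zero => rfl
        | succ n ih => rw [pvAIter, pvAStep_of_nonpos l (by omega), ih]
      rw [hiter, hm, Option.getD_some]
    · have : k.toNat = 0 := by omega
      rw [this, pvAIter, hm, Option.getD_some]
  · rw [if_neg h1]
    push_neg at h1
    obtain ⟨hm0, hk0⟩ := h1
    have hk : ((k.toNat : Int)) = k := Int.toNat_of_nonneg (by omega)
    have hLne : pvAIter k.toNat l ≠ [] := by
      intro hnil
      have := pvAIter_length k.toNat l
      rw [hnil] at this
      exact hpre (List.eq_nil_of_length_eq_zero this.symm)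
    obtain ⟨mf, hmf, hmfmem, hmfmax⟩ := pvMax_spec _ hLne
    rw [hmf, Option.getD_some]
    have hub : ∀ v, 0 ≤ v → pvCost l v ≤ k → mf ≤ v := by
      intro v hv hc
      have h0 : pvCost (pvAIter k.toNat l) v = 0 := by
        rw [pvCost_iter k.toNat l v hv, hk]; omega
      by_contra hgt
      have := pvCost_le_of_mem (pvAIter k.toNat l) v mf hmfmem
      omega
    have hlb : ∀ v, 0 ≤ v → k < pvCost l v → v < mf := by
      intro v hv hc
      have h0 : 0 < pvCost (pvAIter k.toNat l) v := by
        rw [pvCost_iter k.toNat l v hv, hk]; omega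
      obtain ⟨y, hy, hvy⟩ := pvCost_exists_gt _ v h0
      exact lt_of_lt_of_le hvy (hmfmax y hy)
    by_cases h2 : pvCost l 0 ≤ k
    · rw [if_pos h2]
      have hle := hub 0 (le_refl 0) h2
      obtain ⟨x, hx, hx0⟩ := pvAIter_exists_nonneg k.toNat l ⟨m, hmem, by omega⟩
      have := hmfmax x hx
      omega
    · rw [if_neg h2]
      push_neg at h2
      have hcm : pvCost l m ≤ k := by
        rw [pvCost_zero_of_le l m hmax]; omega
      have hbs := pvBS_spec l k m.toNat 0 m hm0
        (by rw [Int.toNat_of_nonneg (by omega : (0:Int) ≤ m)]; omega) h2 hcm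
      obtain ⟨hb1, hb2, hb3, hb4⟩ := hbs
      have := hub _ (by omega) hb3
      have := hlb _ (by omega) hb4
      omega
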